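-- pv_equiv track=rewrite | github.com/wangsun39/leetcode | all-code/1001-1100/1096braceExpansionII.py | braceExpansionII
-- ===== SOURCE A (Python) =====
-- from typing import List
--
-- def braceExpansionII(expression: str) -> List[str]:
--     pair = {}
--     stack = []
--     for i, x in enumerate(expression):
--         if x == '{':
--             stack.append(i)
--         elif x == '}':
--             j = stack.pop()
--             pair[j] = i
--     def mul(la, lb):
--         res = []
--         for l1 in la:
--             for l2 in lb:
--                 res.append(l1 + l2)
--         return res
--
--     def split(start, end):
--         acc = 0
--         res = []
--         for i in range(start, end):
--             if expression[i] == '{': acc += 1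
--             elif expression[i] == '}': acc -= 1
--             elif expression[i] == ',' and acc == 0:
--                 res.append(i)
--         res.insert(0, start)
--         res.append(end)
--         return res
--
--     def dfs_bracket(start, end):  # 处理括号内的部分
--         seg = split(start, end + 1)  # [,)
--         res = dfs(seg[0], seg[1] - 1)
--         if len(seg) > 2:
--             for i in range(2, len(seg)):
--                 res += dfs(seg[i - 1] + 1, seg[i] - 1)
--         return res
--
--
--     def dfs(start, end):  # 返回 expression[start: end + 1] 这段的所有字符串
--         if start == end:
--             return [expression[start]]
--         if expression[start] == '{':
--             right = pair[start]
--             res = dfs_bracket(start + 1, right - 1)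
--             if right == end:
--                 return res
--             return mul(res, dfs(right + 1, end))
--         else:
--             return mul(expression[start], dfs(start + 1, end))
--
--     ans = set(dfs(0, len(expression) - 1))
--     return sorted(list(ans))
-- ===== SOURCE B (Python) =====
-- from typing import List
--
-- def braceExpansionII(expression: str) -> List[str]:
--     # One recursive pass with sets: dedup at every union/product node instead of
--     # only once at the end, avoiding A's duplicate-blowup in intermediate lists.
--     n = len(expression)
--     pair = {}
--     st = []
--     for i, x in enumerate(expression):
--         if x == '{':
--             st.append(i)
--         elif x == '}':
--             pair[st.pop()] = i
--
--     def expand(s, e):  # set of strings denoted by expression[s:e+1]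
--         if s == e:
--             return {expression[s]}
--         if expression[s] == '{':
--             r = pair[s]
--             res = alts(s + 1, r - 1)
--             if r == e:
--                 return res
--             rest = expand(r + 1, e)
--             return {a + b for a in res for b in rest}
--         rest = expand(s + 1, e)
--         return {expression[s] + b for b in rest}
--
--     def alts(s, e):  # union over the top-level comma-separated parts of [s, e]
--         d = 0
--         for i in range(s, e + 1):
--             c = expression[i]
--             if c == '{':
--                 d += 1
--             elif c == '}':
--                 d -= 1
--             elif c == ',' and d == 0:
--                 return expand(s, i - 1) | alts(i + 1, e)
--         return expand(s, e)
--
--     return sorted(expand(0, n - 1))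
-- ===== Notes on version B (the rewrite author's own statement) =====
-- stated objective: faster
-- what changed: B replaces A's duplicate-carrying list recursion (index-pair dfs with collect-all-commas split, cross-product list mul, dedup only once at the very end) by a set-based recursion that deduplicates at every union/product node (alternatives split off one first-depth-0-comma at a time), so intermediate results are bounded by the number of distinct strings instead of growing multiplicatively with duplicates.
import Mathlib
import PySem

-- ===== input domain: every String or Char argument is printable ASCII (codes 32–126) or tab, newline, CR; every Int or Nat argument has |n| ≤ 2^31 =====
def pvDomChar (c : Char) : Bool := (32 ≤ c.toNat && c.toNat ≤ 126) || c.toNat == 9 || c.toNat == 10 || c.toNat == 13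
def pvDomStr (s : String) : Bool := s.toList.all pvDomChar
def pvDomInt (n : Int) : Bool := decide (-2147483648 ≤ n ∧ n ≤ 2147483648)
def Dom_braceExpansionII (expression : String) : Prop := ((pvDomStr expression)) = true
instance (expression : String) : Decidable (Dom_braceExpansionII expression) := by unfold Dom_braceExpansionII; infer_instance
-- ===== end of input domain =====

-- B re-implements A's brace expansion as one recursive pass that keeps SETS (dedup at every
-- union/product node) instead of A's duplicate-carrying lists deduplicated only at the end.

-- ===== PORT A =====
-- Strings are handled on the List Char side (PySem convention); a 1-char Python string is a
-- singleton list.  Where Python raises (IndexError on s[i] / pop from an empty stack, KeyError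
-- on pair[j]) the port returns a default — all such inputs are excluded by Pre_ below.

-- pair = {}; stack = []; for i, x in enumerate(expression): …
def braceA_pairs (l : List Char) : PySem.Dict Int Int :=
  ((PySem.List.enumerate l).foldl
    (fun (st : PySem.Dict Int Int × List Int) ix =>
      if ix.2 = '{' then (st.1, ix.1 :: st.2)
      else if ix.2 = '}' then
        match st.2 with
        | j :: rest => (st.1.insert j ix.1, rest)
        | [] => st            -- Python: IndexError (pop from empty list); outside Pre_
      else st)
    (PySem.Dict.empty, [])).1

-- def mul(la, lb): res = []; for l1 in la: for l2 in lb: res.append(l1 + l2); return res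
def braceA_mul (la lb : List (List Char)) : List (List Char) :=
  la.foldl (fun res l1 => lb.foldl (fun res l2 => res ++ [l1 ++ l2]) res) []

-- def split(start, end): acc = 0; res = []; for i in range(start, end): …;
--   res.insert(0, start); res.append(end); return res
def braceA_split (l : List Char) (start stop : Int) : List Int :=
  let scan := (PySem.List.pyRange start stop).foldl
    (fun (st : Int × List Int) i =>
      match PySem.List.pyGet? l i with
      | none => st            -- Python: IndexError; outside Pre_
      | some c =>
        if c = '{' then (st.1 + 1, st.2)
        else if c = '}' then (st.1 - 1, st.2)
        else if c = ',' then (if st.1 = 0 then (st.1, st.2 ++ [i]) else st)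
        else st)
    (0, [])
  start :: scan.2 ++ [stop]

-- def dfs_bracket(start, end): seg = split(start, end + 1); res = dfs(seg[0], seg[1] - 1);
--   if len(seg) > 2: for i in range(2, len(seg)): res += dfs(seg[i-1] + 1, seg[i] - 1)
def braceA_bracket (l : List Char) (dfs : Int → Int → List (List Char)) (start stop : Int) :
    List (List Char) :=
  let seg := braceA_split l start (stop + 1)
  let res := dfs (PySem.List.pyGetD seg 0 0) (PySem.List.pyGetD seg 1 0 - 1)
  if 2 < seg.length then
    (PySem.List.pyRange 2 (seg.length : Int)).foldl
      (fun res i =>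
        res ++ dfs (PySem.List.pyGetD seg (i - 1) 0 + 1) (PySem.List.pyGetD seg i 0 - 1))
      res
  else res

-- def dfs(start, end): … (the fuel argument only makes the recursion total; both ports get the
-- same fuel and the equivalence below holds for every fuel value)
def braceA_dfs (l : List Char) (pair : PySem.Dict Int Int) : Nat → Int → Int → List (List Char)
  | 0, _, _ => []
  | Nat.succ f, start, stop =>
    if start = stop then
      match PySem.List.pyGet? l start with
      | some c => [[c]]
      | none => []            -- Python: IndexError; outside Pre_
    else
      match PySem.List.pyGet? l start with
      | none => []            -- Python: IndexError; outside Pre_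
      | some c =>
        if c = '{' then
          match pair.get? start with
          | none => []        -- Python: KeyError; outside Pre_
          | some right =>
            let res := braceA_bracket l (braceA_dfs l pair f) (start + 1) (right - 1)
            if right = stop then res
            else braceA_mul res (braceA_dfs l pair f (right + 1) stop)
        else braceA_mul [[c]] (braceA_dfs l pair f (start + 1) stop)

-- ans = set(dfs(0, len(expression) - 1)); return sorted(list(ans))
-- (Python's '<' on str IS '<' on the code-point lists: sort on the list side, then rebuild)
def braceExpansionII (expression : String) : List String :=
  let l := expression.toList
  let raw := braceA_dfs l (braceA_pairs l) (2 * l.length + 2) 0 ((l.length : Int) - 1)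
  (PySem.List.sorted (PySem.Set.ofList raw) (fun x => x)).map (fun cs => String.ofList cs)

-- ===== PORT B =====
-- pair = {}; st = []; for i, x in enumerate(expression): …   (Source B's preprocessing)
def braceB_pairs (l : List Char) : PySem.Dict Int Int :=
  ((PySem.List.enumerate l).foldl
    (fun (st : PySem.Dict Int Int × List Int) ix =>
      if ix.2 = '{' then (st.1, ix.1 :: st.2)
      else if ix.2 = '}' then
        match st.2 with
        | j :: rest => (st.1.insert j ix.1, rest)
        | [] => st            -- Python: IndexError; outside Pre_
      else st)
    (PySem.Dict.empty, [])).1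

-- {a + b for a in sa for b in sb}
def braceB_prod (sa sb : PySem.Set (List Char)) : PySem.Set (List Char) :=
  sa.foldl (fun acc a => sb.foldl (fun acc b => acc.add (a ++ b)) acc) PySem.Set.empty

-- the scan `for i in range(s, e + 1): … elif c == ',' and d == 0: return …` of Source B's alts:
-- the position of the first depth-0 comma, scanning the range positions in order
def braceB_findCommaGo (l : List Char) (d : Int) : List Int → Option Int
  | [] => none
  | i :: rest =>
    match PySem.List.pyGet? l i with
    | none => braceB_findCommaGo l d rest       -- Python: IndexError; outside Pre_
    | some c =>
      if c = '{' then braceB_findCommaGo l (d + 1) rest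
      else if c = '}' then braceB_findCommaGo l (d - 1) rest
      else if c = ',' then (if d = 0 then some i else braceB_findCommaGo l d rest)
      else braceB_findCommaGo l d rest

def braceB_findComma (l : List Char) (d s e : Int) : Option Int :=
  braceB_findCommaGo l d (PySem.List.pyRange s (e + 1))

-- def alts(s, e): the first depth-0 comma splits off one alternative; no comma = one part.
-- The Nat argument is a fuel guard only (the caller passes more than the number of splits,
-- so the 0 branch is never reached where Python returns).
def braceB_alts (l : List Char) (expand : Int → Int → PySem.Set (List Char)) :
    Nat → Int → Int → PySem.Set (List Char)
  | 0, s, e => expand s e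
  | Nat.succ m, s, e =>
    match braceB_findComma l 0 s e with
    | none => expand s e
    | some c => PySem.Set.union (expand s (c - 1)) (braceB_alts l expand m (c + 1) e)

-- def expand(s, e): … (fuel only makes the recursion total, as for port A)
def braceB_expand (l : List Char) (pair : PySem.Dict Int Int) :
    Nat → Int → Int → PySem.Set (List Char)
  | 0, _, _ => PySem.Set.empty
  | Nat.succ f, s, e =>
    if s = e then
      match PySem.List.pyGet? l s with
      | some c => PySem.Set.ofList [[c]]
      | none => PySem.Set.empty     -- Python: IndexError; outside Pre_
    else
      match PySem.List.pyGet? l s with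
      | none => PySem.Set.empty     -- Python: IndexError; outside Pre_
      | some c =>
        if c = '{' then
          match pair.get? s with
          | none => PySem.Set.empty -- Python: KeyError; outside Pre_
          | some r =>
            let res := braceB_alts l (braceB_expand l pair f) ((r - s).toNat) (s + 1) (r - 1)
            if r = e then res
            else braceB_prod res (braceB_expand l pair f (r + 1) e)
        else
          -- {expression[s] + b for b in rest}
          (braceB_expand l pair f (s + 1) e).foldl
            (fun acc b => acc.add (c :: b)) PySem.Set.empty

def braceExpansionII_alt (expression : String) : List String :=
  let l := expression.toList
  (PySem.List.sorted
      (braceB_expand l (braceB_pairs l) (2 * l.length + 2) 0 ((l.length : Int) - 1))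
      (fun x => x)).map (fun cs => String.ofList cs)

-- ===== PRECONDITION & SPEC =====
-- Exactly the inputs on which Python A returns: nonempty, every '}' closes an open '{', every
-- '{' is closed (except that a single unmatched '{' as the LAST character is read as a literal
-- by A's leaf case), and no brace group has an empty alternative (A raises on those).
def preCheck (d : Int) : List Char → Bool
  | [] => d == 0
  | ['{'] => d == 0                       -- trailing unmatched '{': A's (and B's) leaf literal
  | '{' :: c :: rest =>
      !(c == '}' || c == ',') && preCheck (d + 1) (c :: rest)
  | '}' :: rest => decide (0 < d) && preCheck (d - 1) rest
  | ',' :: c :: rest =>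
      (d == 0 || !(c == '}' || c == ',')) && preCheck d (c :: rest)
  | _ :: rest => preCheck d rest

def Pre_braceExpansionII (expression : String) : Prop :=
  expression.toList ≠ [] ∧ preCheck 0 expression.toList = true
instance (expression : String) : Decidable (Pre_braceExpansionII expression) := by
  unfold Pre_braceExpansionII; infer_instance

def pvWitness_braceExpansionII : String := "{a,b}{c,{d,e}}f"

def Spec_braceExpansionII (expression : String) (out : List String) : Prop := out = braceExpansionII_alt expression
instance (expression : String) (out : List String) : Decidable (Spec_braceExpansionII expression out) := by unfold Spec_braceExpansionII; infer_instance

-- ===== CLAIM (what is proved, stated in full; the proofs are below) =====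
def Claim_equal_braceExpansionII : Prop := ∀ (expression : String), Dom_braceExpansionII expression → Pre_braceExpansionII expression → Spec_braceExpansionII expression (braceExpansionII expression)

-- ===== LEMMAS AND PROOFS =====

-- the list of depth-0 comma positions along a list of scan positions, from depth d:
-- the common spec of A's split-scan and B's findComma
def commasGo (l : List Char) (d : Int) : List Int → List Int
  | [] => []
  | i :: rest =>
    match PySem.List.pyGet? l i with
    | none => commasGo l d rest
    | some c =>
      if c = '{' then commasGo l (d + 1) rest
      else if c = '}' then commasGo l (d - 1) rest
      else if c = ',' then (if d = 0 then i :: commasGo l d rest else commasGo l d rest)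
      else commasGo l d rest

theorem findCommaGo_none_commas (l : List Char) (d : Int) (ra : List Int)
    (h : braceB_findCommaGo l d ra = none) : commasGo l d ra = [] := by
  fun_induction braceB_findCommaGo l d ra <;> rw [commasGo] <;> simp_all

theorem findCommaGo_mem (l : List Char) (d : Int) (ra : List Int) (c : Int)
    (h : braceB_findCommaGo l d ra = some c) : c ∈ ra := by
  fun_induction braceB_findCommaGo l d ra <;> simp_all

theorem findComma_some_commas (l : List Char) (t : Int) : ∀ (n : Nat) (s d c : Int),
    (t - s).toNat = n → braceB_findCommaGo l d (PySem.List.pyRange s t) = some c →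
    commasGo l d (PySem.List.pyRange s t)
      = c :: commasGo l 0 (PySem.List.pyRange (c + 1) t) := by
  intro n
  induction n with
  | zero =>
    intro s d c hn h
    rw [PySem.List.pyRange_one_eq_nil (by omega)] at h
    simp [braceB_findCommaGo] at h
  | succ n ih =>
    intro s d c hn h
    rw [PySem.List.pyRange_one_cons (by omega)] at h ⊢
    rw [braceB_findCommaGo] at h
    rw [commasGo]
    cases hg : PySem.List.pyGet? l s with
    | none => simp only [hg] at h ⊢; exact ih (s + 1) d c (by omega) h
    | some ch =>
      simp only [hg] at h ⊢
      by_cases h1 : ch = '{'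
      · simp only [if_pos h1] at h ⊢; exact ih (s + 1) (d + 1) c (by omega) h
      · simp only [if_neg h1] at h ⊢
        by_cases h2 : ch = '}'
        · simp only [if_pos h2] at h ⊢; exact ih (s + 1) (d - 1) c (by omega) h
        · simp only [if_neg h2] at h ⊢
          by_cases h3 : ch = ','
          · simp only [if_pos h3] at h ⊢
            by_cases h4 : d = 0
            · simp only [if_pos h4] at h ⊢
              obtain rfl : s = c := by simpa using h
              subst h4
              simp
            · simp only [if_neg h4] at h ⊢; exact ih (s + 1) d c (by omega) h
          · simp only [if_neg h3] at h ⊢; exact ih (s + 1) d c (by omega) h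

-- A's mul is the cross-concatenation
theorem braceA_mul_eq_flatMap (la lb : List (List Char)) :
    braceA_mul la lb = la.flatMap (fun a => lb.map (a ++ ·)) := by
  unfold braceA_mul
  have gen : ∀ (la : List (List Char)) (acc : List (List Char)),
      la.foldl (fun res l1 => lb.foldl (fun res l2 => res ++ [l1 ++ l2]) res) acc
        = acc ++ la.flatMap (fun a => lb.map (a ++ ·)) := by
    intro la
    induction la with
    | nil => simp
    | cons a t ih =>
      intro acc
      simp only [List.foldl_cons, PySem.List.foldl_append_singleton_eq_map (a ++ ·) lb acc, ih,
        List.flatMap_cons, List.append_assoc]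
  simpa using gen la []

theorem mem_braceB_prod (sa sb : PySem.Set (List Char)) (x : List Char) :
    x ∈ braceB_prod sa sb ↔ ∃ a ∈ sa, ∃ b ∈ sb, x = a ++ b := by
  unfold braceB_prod
  have gen : ∀ (sa : List (List Char)) (acc : PySem.Set (List Char)),
      x ∈ sa.foldl (fun acc a => sb.foldl (fun acc b => acc.add (a ++ b)) acc) acc ↔
        x ∈ acc ∨ ∃ a ∈ sa, ∃ b ∈ sb, x = a ++ b := by
    intro sa
    induction sa with
    | nil => simp
    | cons a t ih =>
      intro acc
      simp only [List.foldl_cons, ih, PySem.Set.mem_foldl_add, List.mem_cons]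
      constructor
      · rintro ((h | ⟨b, hb, rfl⟩) | ⟨a', ha', b, hb, rfl⟩)
        · exact Or.inl h
        · exact Or.inr ⟨a, Or.inl rfl, b, hb, rfl⟩
        · exact Or.inr ⟨a', Or.inr ha', b, hb, rfl⟩
      · rintro (h | ⟨a', (rfl | ha'), b, hb, rfl⟩)
        · exact Or.inl (Or.inl h)
        · exact Or.inl (Or.inr ⟨b, hb, rfl⟩)
        · exact Or.inr ⟨a', ha', b, hb, rfl⟩
  rw [gen]
  simp [PySem.Set.empty]

theorem nodup_foldl_add (l : List (List Char)) (f : List Char → List Char)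
    (s : PySem.Set (List Char)) (h : s.Nodup) :
    (l.foldl (fun s b => s.add (f b)) s).Nodup := by
  induction l generalizing s with
  | nil => exact h
  | cons b t ih => exact ih _ (PySem.Set.nodup_add _ _ h)

theorem nodup_braceB_prod (sa sb : PySem.Set (List Char)) : (braceB_prod sa sb).Nodup := by
  unfold braceB_prod
  have gen : ∀ (sa : List (List Char)) (acc : PySem.Set (List Char)), acc.Nodup →
      (sa.foldl (fun acc a => sb.foldl (fun acc b => acc.add (a ++ b)) acc) acc).Nodup := by
    intro sa
    induction sa with
    | nil => exact fun acc h => h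
    | cons a t ih =>
      intro acc h
      exact ih _ (nodup_foldl_add sb (a ++ ·) acc h)
  exact gen sa PySem.Set.empty List.nodup_nil

-- A's split-scan collects exactly commasGo over the same scan positions
theorem split_scan (l : List Char) : ∀ (ra : List Int) (d : Int) (res : List Int),
    (ra.foldl
      (fun (st : Int × List Int) i =>
        match PySem.List.pyGet? l i with
        | none => st
        | some c =>
          if c = '{' then (st.1 + 1, st.2)
          else if c = '}' then (st.1 - 1, st.2)
          else if c = ',' then (if st.1 = 0 then (st.1, st.2 ++ [i]) else st)
          else st)
      (d, res)).2 = res ++ commasGo l d ra := by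
  intro ra
  induction ra with
  | nil => intro d res; simp [commasGo]
  | cons i rest ih =>
    intro d res
    rw [List.foldl_cons, commasGo]
    cases hg : PySem.List.pyGet? l i with
    | none => simpa using ih d res
    | some c =>
      simp only
      by_cases h1 : c = '{'
      · simp only [if_pos h1]; simpa using ih (d + 1) res
      · simp only [if_neg h1]
        by_cases h2 : c = '}'
        · simp only [if_pos h2]; simpa using ih (d - 1) res
        · simp only [if_neg h2]
          by_cases h3 : c = ','
          · simp only [if_pos h3]
            by_cases h4 : d = 0
            · simp only [if_pos h4]
              rw [ih d (res ++ [i])]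
              simp
            · simp only [if_neg h4]; simpa using ih d res
          · simp only [if_neg h3]; simpa using ih d res

theorem braceA_split_eq (l : List Char) (s t : Int) :
    braceA_split l s t = s :: commasGo l 0 (PySem.List.pyRange s t) ++ [t] := by
  unfold braceA_split
  dsimp only
  rw [split_scan l (PySem.List.pyRange s t) 0 []]
  simp

-- the window fold of dfs_bracket, unrolled over the tail of seg
def wrec (g : Int → Int → List (List Char)) : List Int → List (List Char)
  | [] => []
  | [_] => []
  | p :: q :: r => g p q ++ wrec g (q :: r)
  termination_by w => w.length

theorem wrec_short (g : Int → Int → List (List Char)) (w : List Int) (h : w.length ≤ 1) :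
    wrec g w = [] := by
  match w with
  | [] => rw [wrec]
  | [p] => rw [wrec]
  | p :: q :: r => simp at h

theorem wrec_single (g : Int → Int → List (List Char)) (p : Int) : wrec g [p] = [] := by
  simp [wrec]

theorem wrec_cons (g : Int → Int → List (List Char)) (p q : Int) (r : List Int) :
    wrec g (p :: q :: r) = g p q ++ wrec g (q :: r) := by
  rw [wrec.eq_def]

theorem bracket_foldW (g : Int → Int → List (List Char)) (seg : List Int) :
    ∀ (n k : Nat) (res0 : List (List Char)), seg.length - (k + 2) = n →
    (PySem.List.pyRange ((k : Int) + 2) (seg.length : Int)).foldl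
      (fun res i =>
        res ++ g (PySem.List.pyGetD seg (i - 1) 0 + 1) (PySem.List.pyGetD seg i 0 - 1)) res0
    = res0 ++ wrec (fun p q => g (p + 1) (q - 1)) (seg.drop (k + 1)) := by
  intro n
  induction n with
  | zero =>
    intro k res0 hn
    rw [PySem.List.pyRange_one_eq_nil (by omega), List.foldl_nil,
      wrec_short _ _ (by simp; omega), List.append_nil]
  | succ n ih =>
    intro k res0 hn
    have hk2 : k + 2 < seg.length := by omega
    have hk1 : k + 1 < seg.length := by omega
    rw [PySem.List.pyRange_one_cons (by omega), List.foldl_cons]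
    have e1 : ((k : Int) + 2) - 1 = ((k + 1 : Nat) : Int) := by push_cast; ring
    have e2 : ((k : Int) + 2) = ((k + 2 : Nat) : Int) := by push_cast; ring
    rw [e1, e2, PySem.List.pyGetD_natCast, PySem.List.pyGetD_natCast]
    have e3 : ((k + 2 : Nat) : Int) + 1 = ((k + 1 : Nat) : Int) + 2 := by push_cast; ring
    rw [e3, ih (k + 1) _ (by omega)]
    rw [List.drop_eq_getElem_cons hk1, List.drop_eq_getElem_cons hk2, wrec]
    rw [List.getD_eq_getElem seg 0 hk1, List.getD_eq_getElem seg 0 hk2]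
    simp

theorem braceA_bracket_eq_wrec (l : List Char) (dfs : Int → Int → List (List Char)) (s e : Int) :
    braceA_bracket l dfs s e
      = wrec (fun p q => dfs (p + 1) (q - 1))
          ((s - 1) :: commasGo l 0 (PySem.List.pyRange s (e + 1)) ++ [e + 1]) := by
  unfold braceA_bracket
  dsimp only
  rw [braceA_split_eq]
  cases hcs : commasGo l 0 (PySem.List.pyRange s (e + 1)) with
  | nil =>
    simp only [List.cons_append, List.nil_append]
    rw [wrec_cons, wrec_single]
    norm_num [PySem.List.pyGetD_ofNat']
  | cons c cs =>
    simp only [List.cons_append]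
    have hlen : (s :: c :: (cs ++ [e + 1])).length = cs.length + 3 := by simp
    rw [if_pos (by rw [hlen]; omega)]
    have h2 : (2 : Int) = ((0 : Nat) : Int) + 2 := by norm_num
    rw [h2, bracket_foldW _ _ ((s :: c :: (cs ++ [e + 1])).length - 2) 0 _ rfl]
    rw [wrec_cons]
    have hd : (s :: c :: (cs ++ [e + 1])).drop (0 + 1) = c :: (cs ++ [e + 1]) := by simp
    rw [hd]
    simp [PySem.List.pyGetD_ofNat']

theorem braceA_bracket_nil (l : List Char) (dfs : Int → Int → List (List Char)) (s e : Int)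
    (h : commasGo l 0 (PySem.List.pyRange s (e + 1)) = []) :
    braceA_bracket l dfs s e = dfs s e := by
  rw [braceA_bracket_eq_wrec, h]
  simp only [List.nil_append, List.cons_append]
  rw [wrec_cons, wrec_single]
  simp

theorem braceA_bracket_cons (l : List Char) (dfs : Int → Int → List (List Char)) (s e c : Int)
    (cs : List Int) (h : commasGo l 0 (PySem.List.pyRange s (e + 1)) = c :: cs)
    (h2 : commasGo l 0 (PySem.List.pyRange (c + 1) (e + 1)) = cs) :
    braceA_bracket l dfs s e = dfs s (c - 1) ++ braceA_bracket l dfs (c + 1) e := by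
  rw [braceA_bracket_eq_wrec, h, braceA_bracket_eq_wrec, h2]
  have hc : c + 1 - 1 = c := by ring
  simp only [List.cons_append, hc]
  rw [wrec_cons]
  have hs : s - 1 + 1 = s := by ring
  rw [hs]

-- unfolding braceB_alts along findComma
theorem braceB_alts_none (l : List Char) (expand : Int → Int → PySem.Set (List Char)) (m : Nat)
    (s e : Int) (h : braceB_findComma l 0 s e = none) :
    braceB_alts l expand (m + 1) s e = expand s e := by
  simp [braceB_alts, h]

theorem braceB_alts_some (l : List Char) (expand : Int → Int → PySem.Set (List Char)) (m : Nat)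
    (s e c : Int) (h : braceB_findComma l 0 s e = some c) :
    braceB_alts l expand (m + 1) s e
      = PySem.Set.union (expand s (c - 1)) (braceB_alts l expand m (c + 1) e) := by
  simp [braceB_alts, h]

-- membership equivalence of A's dfs_bracket and B's alts, given it for the inner calls
theorem mem_bracket_alts (l : List Char) (pair : PySem.Dict Int Int) (f : Nat)
    (hEXP : ∀ s e x, x ∈ braceA_dfs l pair f s e ↔ x ∈ braceB_expand l pair f s e)
    (e : Int) : ∀ (m : Nat) (s : Int), (e + 1 - s).toNat ≤ m → ∀ (x : List Char),
    x ∈ braceA_bracket l (braceA_dfs l pair f) s e ↔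
      x ∈ braceB_alts l (braceB_expand l pair f) m s e := by
  intro m
  induction m with
  | zero =>
    intro s hm x
    rw [braceA_bracket_nil _ _ _ _ (by
      rw [PySem.List.pyRange_one_eq_nil (by omega)]; rfl)]
    exact hEXP s e x
  | succ m ih =>
    intro s hm x
    cases hfc : braceB_findComma l 0 s e with
    | none =>
      rw [braceA_bracket_nil _ _ _ _ (findCommaGo_none_commas _ _ _ hfc),
        braceB_alts_none _ _ _ _ _ hfc]
      exact hEXP s e x
    | some c =>
      have hbm : c ∈ PySem.List.pyRange s (e + 1) := findCommaGo_mem _ _ _ _ hfc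
      rw [PySem.List.mem_pyRange_one] at hbm
      rw [braceA_bracket_cons l _ s e c _
          (findComma_some_commas l (e + 1) ((e + 1 - s).toNat) s 0 c rfl hfc) rfl,
        braceB_alts_some _ _ _ _ _ _ hfc]
      rw [List.mem_append, PySem.Set.mem_union, hEXP s (c - 1) x,
        ih (c + 1) (by omega) x]

-- membership equivalence of A's dfs and B's expand, for every fuel
theorem mem_dfs_expand (l : List Char) (pair : PySem.Dict Int Int) :
    ∀ (f : Nat) (s e : Int) (x : List Char),
    x ∈ braceA_dfs l pair f s e ↔ x ∈ braceB_expand l pair f s e := by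
  intro f
  induction f with
  | zero => intro s e x; rw [braceA_dfs, braceB_expand]; simp [PySem.Set.empty]
  | succ f ih =>
    intro s e x
    rw [braceA_dfs, braceB_expand]
    by_cases hse : s = e
    · simp only [if_pos hse]
      cases PySem.List.pyGet? l s with
      | none => simp [PySem.Set.empty]
      | some c => simp [PySem.Set.ofList]
    · simp only [if_neg hse]
      cases PySem.List.pyGet? l s with
      | none => simp [PySem.Set.empty]
      | some c =>
        simp only
        by_cases hc : c = '{'
        · simp only [if_pos hc]
          cases pair.get? s with
          | none => simp [PySem.Set.empty]
          | some r =>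
            simp only
            by_cases hre : r = e
            · simp only [if_pos hre]
              exact mem_bracket_alts l pair f ih (r - 1) ((r - s).toNat) (s + 1) (by omega) x
            · simp only [if_neg hre]
              rw [braceA_mul_eq_flatMap, mem_braceB_prod]
              simp only [List.mem_flatMap, List.mem_map]
              constructor
              · rintro ⟨a, ha, b, hb, rfl⟩
                exact ⟨a, (mem_bracket_alts l pair f ih (r - 1) ((r - s).toNat) (s + 1) (by omega) a).1 ha,
                  b, (ih (r + 1) e b).1 hb, rfl⟩
              · rintro ⟨a, ha, b, hb, rfl⟩
                exact ⟨a, (mem_bracket_alts l pair f ih (r - 1) ((r - s).toNat) (s + 1) (by omega) a).2 ha,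
                  b, (ih (r + 1) e b).2 hb, rfl⟩
        · simp only [if_neg hc]
          rw [braceA_mul_eq_flatMap]
          rw [PySem.Set.mem_foldl_add]
          simp only [List.mem_flatMap, List.mem_map, List.mem_singleton]
          constructor
          · rintro ⟨a, rfl, b, hb, rfl⟩
            exact Or.inr ⟨b, (ih (s + 1) e b).1 hb, rfl⟩
          · rintro (h | ⟨b, hb, rfl⟩)
            · simp [PySem.Set.empty] at h
            · exact ⟨[c], rfl, b, (ih (s + 1) e b).2 hb, rfl⟩

theorem nodup_braceB_alts (l : List Char) (expand : Int → Int → PySem.Set (List Char))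
    (hexp : ∀ s e, (expand s e).Nodup) (m : Nat) (s e : Int) :
    (braceB_alts l expand m s e).Nodup := by
  induction m generalizing s with
  | zero => exact hexp s e
  | succ m ih =>
    cases hfc : braceB_findComma l 0 s e with
    | none => rw [braceB_alts_none _ _ _ _ _ hfc]; exact hexp s e
    | some c =>
      rw [braceB_alts_some _ _ _ _ _ _ hfc]
      exact PySem.Set.nodup_union _ _ (hexp s (c - 1))

theorem nodup_braceB_expand (l : List Char) (pair : PySem.Dict Int Int) :
    ∀ (f : Nat) (s e : Int), (braceB_expand l pair f s e).Nodup := by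
  intro f
  induction f with
  | zero => intro s e; rw [braceB_expand]; simp [PySem.Set.empty]
  | succ f ih =>
    intro s e
    rw [braceB_expand]
    by_cases hse : s = e
    · simp only [if_pos hse]
      cases PySem.List.pyGet? l s with
      | none => simp [PySem.Set.empty]
      | some c => exact PySem.Set.nodup_ofList _
    · simp only [if_neg hse]
      cases PySem.List.pyGet? l s with
      | none => simp [PySem.Set.empty]
      | some c =>
        simp only
        by_cases hc : c = '{'
        · simp only [if_pos hc]
          cases pair.get? s with
          | none => simp [PySem.Set.empty]
          | some r =>
            simp only
            by_cases hre : r = e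
            · simp only [if_pos hre]
              exact nodup_braceB_alts l _ (fun s e => ih s e) _ _ _
            · simp only [if_neg hre]
              exact nodup_braceB_prod _ _
        · simp only [if_neg hc]
          exact nodup_foldl_add _ _ _ List.nodup_nil

-- ===== VERDICT (by name: the statement is the Claim_ definition above) =====
theorem braceExpansionII_spec : Claim_equal_braceExpansionII := by
  intro expression _ _
  unfold Spec_braceExpansionII braceExpansionII braceExpansionII_alt
  dsimp only
  have hpairs : braceB_pairs = braceA_pairs := rfl
  rw [hpairs]
  refine congrArg _ ?_
  have hperm : (PySem.Set.ofList (braceA_dfs expression.toList (braceA_pairs expression.toList)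
      (2 * expression.toList.length + 2) 0 ((expression.toList.length : Int) - 1))).Perm
      (braceB_expand expression.toList (braceA_pairs expression.toList)
      (2 * expression.toList.length + 2) 0 ((expression.toList.length : Int) - 1)) := by
    rw [List.perm_ext_iff_of_nodup (PySem.Set.nodup_ofList _) (nodup_braceB_expand _ _ _ _ _)]
    intro a
    rw [PySem.Set.mem_ofList, mem_dfs_expand]
  have := PySem.List.sorted_eq_sorted_of_perm (κ := List Char) _ _ (fun x => x)
    (fun a b h => h) hperm
  convert this using 2
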